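-- pv_equiv track=rewrite | github.com/Outlying3720/PiecesOfLife | earthquake_battle/simple_filter.py | process_boolean_list
-- ===== SOURCE A (Python) =====
-- def process_boolean_list(bool_list):
--         processed_list = bool_list.copy()  # 复制原始列表，以免修改原始列表内容
--
--         for i in range(len(bool_list)):
--             count_false = sum(1 for j in range(max(0, i-10), min(len(bool_list), i+11)) if not bool_list[j])
--             if count_false > 10:  # 如果False的个数超过一半
--                 processed_list[i] = False
--             else:
--                 processed_list[i] = True
--
--         return processed_list
-- ===== SOURCE B (Python) =====
-- def process_boolean_list(bool_list):
--     n = len(bool_list)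
--     prefix = [0]
--     acc = 0
--     for b in bool_list:
--         acc += 0 if b else 1
--         prefix.append(acc)
--     return [prefix[min(n, i + 11)] - prefix[max(0, i - 10)] <= 10 for i in range(n)]
-- ===== Notes on version B (the rewrite author's own statement) =====
-- stated objective: faster
-- what changed: Replaces the per-index rescan of the 21-wide window by a prefix-sum array of False counts built in one pass, so each output element is one subtraction instead of a 21-element scan.
import Mathlib
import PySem

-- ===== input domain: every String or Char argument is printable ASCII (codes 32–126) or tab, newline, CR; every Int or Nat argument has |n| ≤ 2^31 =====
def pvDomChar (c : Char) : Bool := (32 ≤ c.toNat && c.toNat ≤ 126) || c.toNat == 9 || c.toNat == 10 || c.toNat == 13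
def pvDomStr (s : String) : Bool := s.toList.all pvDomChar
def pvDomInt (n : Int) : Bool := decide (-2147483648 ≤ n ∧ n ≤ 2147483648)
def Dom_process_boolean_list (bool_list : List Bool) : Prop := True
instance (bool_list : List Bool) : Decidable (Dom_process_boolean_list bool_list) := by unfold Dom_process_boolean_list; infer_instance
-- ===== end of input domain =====

-- B replaces A's 21-element rescan at every index by a one-pass prefix-sum array of False counts (objective: faster, constant factor).

-- ===== PORT A =====
def process_boolean_list (bool_list : List Bool) : List Bool :=
  (PySem.List.pyRange 0 (bool_list.length : Int) 1).foldl
    (fun processed i =>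
      let count_false : Int :=
        (PySem.List.pyRange (max 0 (i - 10)) (min (bool_list.length : Int) (i + 11)) 1).foldl
          (fun acc j => if PySem.List.pyGetD bool_list j true = false then acc + 1 else acc) 0
      PySem.List.pySetD processed i (if count_false > 10 then false else true))
    bool_list

-- ===== PORT B =====
-- running prefix sums of False counts: pbPrefAux bs acc = [acc, acc+c1, acc+c1+c2, …]
def pbPrefAux (bs : List Bool) (acc : Int) : List Int :=
  match bs with
  | [] => [acc]
  | b :: t => acc :: pbPrefAux t (acc + if b then 0 else 1)

def process_boolean_list_alt (bool_list : List Bool) : List Bool :=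
  let n : Int := bool_list.length
  let pfx := pbPrefAux bool_list 0
  (PySem.List.pyRange 0 n 1).map (fun i =>
    decide (PySem.List.pyGetD pfx (min n (i + 11)) 0 - PySem.List.pyGetD pfx (max 0 (i - 10)) 0 ≤ 10))

-- ===== PRECONDITION & SPEC =====
def Spec_process_boolean_list (bool_list : List Bool) (out : List Bool) : Prop := out = process_boolean_list_alt bool_list
instance (bool_list : List Bool) (out : List Bool) : Decidable (Spec_process_boolean_list bool_list out) := by unfold Spec_process_boolean_list; infer_instance

-- ===== CLAIM (what is proved, stated in full; the proofs are below) =====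
def Claim_equal_process_boolean_list : Prop := ∀ (bool_list : List Bool), Dom_process_boolean_list bool_list → Spec_process_boolean_list bool_list (process_boolean_list bool_list)

-- ===== LEMMAS AND PROOFS =====

-- count of Falses among the first m elements, as an Int
def pbCnt (bs : List Bool) (m : Nat) : Int :=
  ((bs.take m).countP (fun b => b == false) : Int)

lemma pbCnt_succ (bs : List Bool) (m : Nat) (hm : m < bs.length) :
    pbCnt bs (m + 1) = pbCnt bs m + (if bs[m] = false then 1 else 0) := by
  unfold pbCnt
  rw [List.take_add_one, List.countP_append]
  simp [List.getElem?_eq_getElem hm, List.countP, List.countP.go]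
  cases h : bs[m] <;> simp

-- the inner loop of A computes a prefix-count difference
lemma pbFoldCount (bs : List Bool) :
    ∀ (d : Nat) (lo hi : Int), 0 ≤ lo → lo ≤ hi → hi ≤ bs.length → (hi - lo).toNat = d →
    ∀ c : Int,
      (PySem.List.pyRange lo hi 1).foldl
        (fun acc j => if PySem.List.pyGetD bs j true = false then acc + 1 else acc) c
      = c + pbCnt bs hi.toNat - pbCnt bs lo.toNat := by
  intro d
  induction d with
  | zero =>
    intro lo hi h0 hlh hhn hd c
    have : hi = lo := by omega
    subst this
    rw [PySem.List.pyRange_one_eq_nil (le_refl _)]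
    simp
  | succ d ih =>
    intro lo hi h0 hlh hhn hd c
    have hlt : lo < hi := by omega
    rw [PySem.List.pyRange_one_cons hlt]
    simp only [List.foldl_cons]
    have hget : PySem.List.pyGetD bs lo true = bs[lo.toNat]'(by omega) :=
      PySem.List.pyGetD_eq_getElem _ _ h0 (by omega)
    rw [ih (lo + 1) hi (by omega) (by omega) hhn (by omega)]
    have hcnt := pbCnt_succ bs lo.toNat (by omega)
    have hsucc : (lo + 1).toNat = lo.toNat + 1 := by omega
    rw [hget, hsucc, hcnt]
    split_ifs <;> omega

-- the prefix array built by B holds the prefix counts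
lemma pbPrefAux_get (bs : List Bool) :
    ∀ (acc : Int) (j : Nat), j ≤ bs.length →
      PySem.List.pyGetD (pbPrefAux bs acc) (j : Int) 0 = acc + pbCnt bs j := by
  induction bs with
  | nil =>
    intro acc j hj
    have : j = 0 := by simpa using hj
    subst this
    simp [pbPrefAux, pbCnt]
  | cons b t ih =>
    intro acc j hj
    cases j with
    | zero => simp [pbPrefAux, pbCnt, PySem.List.pyGetD]
    | succ j =>
      have : PySem.List.pyGetD (pbPrefAux (b :: t) acc) ((j + 1 : Nat) : Int) 0
           = PySem.List.pyGetD (pbPrefAux t (acc + if b then 0 else 1)) (j : Int) 0 := by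
        rw [PySem.List.pyGetD_natCast, PySem.List.pyGetD_natCast]
        simp [pbPrefAux]
      rw [this, ih _ j (by simpa using hj)]
      unfold pbCnt
      simp only [List.take_succ_cons, List.countP_cons]
      cases b <;> simp <;> ring
  -- (cases on b handled by split_ifs)

-- A's fold of in-range assignments, read back pointwise
lemma pbFoldSet_get (g : Int → Bool) :
    ∀ (is : List Int) (l : List Bool),
      (∀ i ∈ is, 0 ≤ i ∧ i < l.length) →
      ∀ k : Nat,
        (is.foldl (fun p i => PySem.List.pySetD p i (g i)) l)[k]?
        = if (k : Int) ∈ is then (if k < l.length then some (g k) else none) else l[k]? := by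
  intro is
  induction is with
  | nil => intro l _ k; simp
  | cons i t ih =>
    intro l h k
    have hi := h i (by simp)
    have hset : PySem.List.pySetD l i (g i) = l.set i.toNat (g i) :=
      PySem.List.pySetD_of_nonneg _ _ hi.1
    simp only [List.foldl_cons, hset]
    rw [ih (l.set i.toNat (g i)) (by simpa using fun x hx => h x (by simp [hx])) k]
    simp only [List.length_set, List.mem_cons]
    by_cases hkt : (k : Int) ∈ t
    · simp [hkt]
    · by_cases hki : (k : Int) = i
      · have : k = i.toNat := by omega
        subst this
        simp [hki, (by omega : i.toNat < l.length)]
      · have hne : i.toNat ≠ k := by omega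
        simp [hkt, hki, List.getElem?_set_ne hne]

-- per-index values of the two ports
def pbA (bool_list : List Bool) (i : Int) : Bool :=
  if (PySem.List.pyRange (max 0 (i - 10)) (min (bool_list.length : Int) (i + 11)) 1).foldl
        (fun acc j => if PySem.List.pyGetD bool_list j true = false then acc + 1 else acc) (0 : Int) > 10
  then false else true

def pbB (bool_list : List Bool) (i : Int) : Bool :=
  decide (PySem.List.pyGetD (pbPrefAux bool_list 0) (min (bool_list.length : Int) (i + 11)) 0
        - PySem.List.pyGetD (pbPrefAux bool_list 0) (max 0 (i - 10)) 0 ≤ 10)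

lemma portA_eq (bool_list : List Bool) :
    process_boolean_list bool_list
    = (PySem.List.pyRange 0 (bool_list.length : Int) 1).foldl
        (fun p i => PySem.List.pySetD p i (pbA bool_list i)) bool_list := rfl

lemma portB_eq (bool_list : List Bool) :
    process_boolean_list_alt bool_list
    = (PySem.List.pyRange 0 (bool_list.length : Int) 1).map (pbB bool_list) := rfl

lemma pbPoint (bool_list : List Bool) (k : Nat) (hk : k < bool_list.length) :
    pbA bool_list (k : Int) = pbB bool_list (k : Int) := by
  unfold pbA pbB
  obtain ⟨lo, hlo⟩ : ∃ lo : Int, max 0 ((k : Int) - 10) = lo := ⟨_, rfl⟩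
  obtain ⟨hi, hhi⟩ : ∃ hi : Int, min (bool_list.length : Int) ((k : Int) + 11) = hi := ⟨_, rfl⟩
  rw [hlo, hhi]
  have h0 : (0 : Int) ≤ lo := by omega
  have hlh : lo ≤ hi := by omega
  have hhn : hi ≤ bool_list.length := by omega
  rw [pbFoldCount bool_list (hi - lo).toNat lo hi h0 hlh hhn rfl 0]
  have ehi : hi = ((hi.toNat : Nat) : Int) := by omega
  have elo : lo = ((lo.toNat : Nat) : Int) := by omega
  rw [ehi, elo, pbPrefAux_get bool_list 0 hi.toNat (by omega),
      pbPrefAux_get bool_list 0 lo.toNat (by omega)]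
  simp only [Int.toNat_natCast]
  split_ifs with h
  · symm
    simp only [decide_eq_false_iff_not]
    omega
  · symm
    simp only [decide_eq_true_eq]
    omega

-- ===== VERDICT (by name: the statement is the Claim_ definition above) =====
theorem process_boolean_list_spec : Claim_equal_process_boolean_list := by
  intro bool_list _
  unfold Spec_process_boolean_list
  rw [portA_eq, portB_eq]
  apply List.ext_getElem?
  intro k
  have hmem : ∀ i ∈ PySem.List.pyRange 0 (bool_list.length : Int) 1,
      0 ≤ i ∧ i < bool_list.length := by
    intro i hi
    rw [PySem.List.mem_pyRange_one] at hi
    exact ⟨hi.1, hi.2⟩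
  rw [pbFoldSet_get (pbA bool_list) _ bool_list hmem k]
  by_cases hk : k < bool_list.length
  · have hBmem : ((k : Int)) ∈ PySem.List.pyRange 0 (bool_list.length : Int) 1 := by
      rw [PySem.List.mem_pyRange_one]
      constructor <;> omega
    rw [if_pos hBmem, if_pos hk,
        PySem.List.getElem?_map_pyRange_zero (pbB bool_list) bool_list.length k hk,
        pbPoint bool_list k hk]
  · have hBmem : ¬ ((k : Int)) ∈ PySem.List.pyRange 0 (bool_list.length : Int) 1 := by
      rw [PySem.List.mem_pyRange_one]
      omega
    rw [if_neg hBmem, List.getElem?_eq_none (by omega), List.getElem?_eq_none]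
    rw [List.length_map, PySem.List.length_pyRange_one]
    omega
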